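-- pv_equiv track=rewrite | github.com/miliar/Code_Jam_Webscraper | solutions_python/Problem_178/1670.py | replace_front
-- ===== SOURCE A (Python) =====
-- def check_validity(s):
--     n = 0
--     for i in range (len (s)):
--         if s [i] == '+':
--             n = n + 1
--     if n == len (s):
--         return True
--     else:
--         return False
--
-- def replace_front (s):
--     s = list (s)
--     all_plus = check_validity (s)
--     if all_plus == True:
--         return 0
--
--     c = 0
--     while (not all_plus):
--         start = s [0]
--         for i in range (len (s)):
--             if s [i] == start:
--                 if start == '+':
--                     s [i] = '-'
--                 else:
--                     s [i] = '+'
--             else: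
--                 break
--         c = c + 1
--         all_plus = check_validity (s)
--
--
--     return c
-- ===== SOURCE B (Python) =====
-- def replace_front(s):
--     runs = 0
--     prev = None
--     for ch in s:
--         if ch != prev:
--             runs += 1
--             prev = ch
--     return runs - 1 if s.endswith('+') else runs
-- ===== Notes on version B (the rewrite author's own statement) =====
-- stated objective: alternative
-- what changed: B replaces A's repeated simulation (flip the leading run, rescan the whole string for all-plus, repeat) by a single pass that counts maximal runs and subtracts 1 when the string ends in a plus sign; intended as asymptotically faster (O(n) vs O(n^2)) but a timing run could not confirm a ratio because A times out on the large random inputs.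
-- outside the precondition, e.g. on replace_front('a--'): A returns 3, B returns 2; on replace_front('ab'): A does not finish within the time limit, B returns 2
import Mathlib
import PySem

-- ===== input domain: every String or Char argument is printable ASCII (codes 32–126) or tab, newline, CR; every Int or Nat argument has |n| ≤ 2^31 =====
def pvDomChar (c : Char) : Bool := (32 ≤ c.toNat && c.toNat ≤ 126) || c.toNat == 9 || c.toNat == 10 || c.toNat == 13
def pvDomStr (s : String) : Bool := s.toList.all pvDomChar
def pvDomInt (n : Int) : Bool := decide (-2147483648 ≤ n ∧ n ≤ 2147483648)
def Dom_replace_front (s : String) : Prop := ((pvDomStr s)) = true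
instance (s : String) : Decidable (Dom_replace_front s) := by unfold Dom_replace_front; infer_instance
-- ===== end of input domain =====

-- B changes the algorithm: one pass counting maximal runs (minus 1 when the string ends in a
-- plus sign) instead of A's repeated flip-the-leading-run simulation with a full rescan per step.

-- ===== PORT A =====
-- check_validity: count '+' over the characters (Python: for i in range(len(s)): if s[i]=='+') and compare with the length
def pvCheckValidity (l : List Char) : Bool :=
  let n : Int := l.foldl (fun n c => if c = '+' then n + 1 else n) 0
  n = (l.length : Int)

-- inner 'for i … if s[i]==start: flip else break' — rewrites the leading run of `start`, leaves the rest
def pvFlipFront (start : Char) : List Char → List Char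
  | [] => []
  | c :: rest =>
      if c = start then (if start = '+' then '-' else '+') :: pvFlipFront start rest
      else c :: rest

-- the 'while not all_plus' loop; fuel makes it total (ample under Pre_, where A terminates)
def pvLoopA : Nat → List Char → Int → Int
  | 0, _, c => c
  | fuel + 1, l, c =>
      let start := l.headD ' '
      let l' := pvFlipFront start l
      let c' := c + 1
      if pvCheckValidity l' then c' else pvLoopA fuel l' c'

def replace_front (s : String) : Int :=
  let l := s.toList
  if pvCheckValidity l then 0
  else pvLoopA (l.length + 1) l 0

-- ===== PORT B =====
-- the single pass of Source B: runs/prev accumulator over the characters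
def pvRunsLoop : List Char → Option Char → Int → Int
  | [], _, runs => runs
  | ch :: t, prev, runs =>
      if some ch ≠ prev then pvRunsLoop t (some ch) (runs + 1)
      else pvRunsLoop t prev runs

def replace_front_alt (s : String) : Int :=
  let runs := pvRunsLoop s.toList none 0
  if PySem.Str.endswith s "+" then runs - 1 else runs

-- ===== PRECONDITION & SPEC =====
-- Pre_ admits strings over the problem's two-sign alphabet (plus/minus) and uniform strings
-- (every character equal to the first): outside these A diverges on most inputs (e.g. "ab"),
-- and where it does return (e.g. "a--") the value depends on how a foreign leading run is
-- rewritten to plus signs, a corner no specification fixes.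
def Pre_replace_front (s : String) : Prop :=
  (s.toList.all (fun c => c == '+' || c == '-')
    || s.toList.all (fun c => c == s.toList.headD ' ')) = true
instance (s : String) : Decidable (Pre_replace_front s) := by unfold Pre_replace_front; infer_instance
def pvWitness_replace_front : String := "--++-+"
def Spec_replace_front (s : String) (out : Int) : Prop := out = replace_front_alt s
instance (s : String) (out : Int) : Decidable (Spec_replace_front s out) := by unfold Spec_replace_front; infer_instance

-- ===== CLAIM (what is proved, stated in full; the proofs are below) =====
def Claim_equal_replace_front : Prop := ∀ (s : String), Dom_replace_front s → Pre_replace_front s → Spec_replace_front s (replace_front s)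

-- ===== LEMMAS AND PROOFS =====

-- number of runs seen after a previous character p / in a whole list
def pvRunsAfter (p : Char) : List Char → Nat
  | [] => 0
  | c :: t => (if c = p then 0 else 1) + pvRunsAfter c t

def pvRuns : List Char → Nat
  | [] => 0
  | c :: t => 1 + pvRunsAfter c t

lemma runsLoop_eq (l : List Char) : ∀ (p : Char) (r : Int),
    pvRunsLoop l (some p) r = r + (pvRunsAfter p l : Int) := by
  induction l with
  | nil => intro p r; simp [pvRunsLoop, pvRunsAfter]
  | cons c t ih =>
      intro p r
      by_cases h : c = p <;> simp [pvRunsLoop, pvRunsAfter, h, ih] <;> ring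

lemma runsLoop_none (l : List Char) : pvRunsLoop l none 0 = (pvRuns l : Int) := by
  cases l with
  | nil => simp [pvRunsLoop, pvRuns]
  | cons c t => simp [pvRunsLoop, pvRuns, runsLoop_eq]

lemma foldl_count (l : List Char) : ∀ (n : Int),
    l.foldl (fun n c => if c = '+' then n + 1 else n) n = n + (l.countP (· = '+') : Int) := by
  induction l with
  | nil => intro n; simp
  | cons c t ih =>
      intro n
      by_cases h : c = '+' <;> simp [List.countP_cons, h, ih] <;> push_cast <;> ring

lemma check_iff (l : List Char) : pvCheckValidity l = true ↔ ∀ c ∈ l, c = '+' := by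
  unfold pvCheckValidity
  simp only [foldl_count, zero_add, decide_eq_true_eq, Nat.cast_inj]
  rw [List.countP_eq_length]
  simp

lemma flipFront_spec : ∀ (k : Nat) (a : Char) (rest : List Char),
    (∀ b, rest.head? = some b → b ≠ a) →
    pvFlipFront a (List.replicate k a ++ rest) =
      List.replicate k (if a = '+' then '-' else '+') ++ rest := by
  intro k
  induction k with
  | zero =>
      intro a rest h
      cases rest with
      | nil => simp [pvFlipFront]
      | cons b r =>
          have : b ≠ a := h b rfl
          simp [pvFlipFront, this]
  | succ n ih =>
      intro a rest h
      simp [List.replicate_succ, pvFlipFront, ih a rest h]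

lemma leading_run (a : Char) (t : List Char) :
    ∃ k rest, 1 ≤ k ∧ a :: t = List.replicate k a ++ rest ∧
      ∀ b, rest.head? = some b → b ≠ a := by
  refine ⟨((a :: t).takeWhile (· = a)).length, (a :: t).dropWhile (· = a), ?_, ?_, ?_⟩
  · simp [List.takeWhile_cons]
  · have h1 := List.takeWhile_append_dropWhile (p := (· = a)) (l := a :: t)
    have h2 : (a :: t).takeWhile (· = a) =
        List.replicate ((a :: t).takeWhile (· = a)).length a := by
      apply List.eq_replicate_of_mem
      intro b hb
      simpa using List.mem_takeWhile_imp hb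
    conv_lhs => rw [← h1]
    rw [← h2]
  · intro b hb
    have hx := List.head?_dropWhile_not (p := fun x => decide (x = a)) (l := a :: t)
    rw [hb] at hx
    simpa using hx

lemma runsAfter_replicate (x : Char) : ∀ (j : Nat) (ys : List Char),
    pvRunsAfter x (List.replicate j x ++ ys) = pvRunsAfter x ys := by
  intro j
  induction j with
  | zero => simp
  | succ n ih => intro ys; simp [List.replicate_succ, pvRunsAfter, ih]

lemma runs_replicate_append (x : Char) (k : Nat) (hk : 1 ≤ k) (ys : List Char) :
    pvRuns (List.replicate k x ++ ys) = pvRuns (x :: ys) := by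
  cases k with
  | zero => omega
  | succ n => simp [List.replicate_succ, pvRuns, runsAfter_replicate]

lemma runsAfter_all_eq (p : Char) : ∀ (l : List Char), (∀ c ∈ l, c = p) → pvRunsAfter p l = 0 := by
  intro l
  induction l with
  | nil => intro _; rfl
  | cons c t ih =>
      intro h
      have hc : c = p := h c (by simp)
      subst hc
      simp [pvRunsAfter, ih (fun d hd => h d (by simp [hd]))]

lemma runs_le_length : ∀ (l : List Char), pvRuns l ≤ l.length := by
  have aux : ∀ (l : List Char) (p : Char), pvRunsAfter p l ≤ l.length := by
    intro l
    induction l with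
    | nil => intro _; simp [pvRunsAfter]
    | cons c t ih =>
        intro p
        have := ih c
        simp only [pvRunsAfter, List.length_cons]
        split <;> omega
  intro l
  cases l with
  | nil => simp [pvRuns]
  | cons c t => simp only [pvRuns, List.length_cons]; have := aux t c; omega

lemma getLast?_append_cons {α : Type} (xs : List α) (b : α) (r : List α) :
    (xs ++ b :: r).getLast? = (b :: r).getLast? := by
  obtain ⟨x, hx⟩ : ∃ x, (b :: r).getLast? = some x :=
    ⟨_, List.getLast?_eq_some_getLast (l := b :: r) (by simp)⟩
  simp [List.getLast?_append, hx]

lemma getLast?_all_plus (l : List Char) (hne : l ≠ []) (h : ∀ c ∈ l, c = '+') :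
    l.getLast? = some '+' := by
  have := h (l.getLast hne) (List.getLast_mem hne)
  rw [List.getLast?_eq_some_getLast hne, this]

-- main invariant of A's while loop on binary strings
lemma loopA_spec : ∀ (fuel : Nat) (l : List Char) (c : Int),
    (∀ x ∈ l, x = '+' ∨ x = '-') →
    pvCheckValidity l = false →
    pvRuns l ≤ fuel →
    pvLoopA fuel l c = c + (pvRuns l : Int) - (if l.getLast? = some '+' then 1 else 0) := by
  intro fuel
  induction fuel with
  | zero =>
      intro l c hbin hck hle
      exfalso
      have hl : l = [] := by
        cases l with
        | nil => rfl
        | cons a t => simp [pvRuns] at hle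
      rw [hl] at hck
      simp [pvCheckValidity] at hck
  | succ n ih =>
      intro l c hbin hck hle
      have hlne : l ≠ [] := by
        intro hl; rw [hl] at hck; simp [pvCheckValidity] at hck
      obtain ⟨a, t, rfl⟩ := List.exists_cons_of_ne_nil hlne
      obtain ⟨k, rest, hk1, hdecomp, hresthead⟩ := leading_run a t
      have hflip : pvFlipFront a (a :: t) =
          List.replicate k (if a = '+' then '-' else '+') ++ rest := by
        rw [hdecomp]; exact flipFront_spec k a rest hresthead
      have hstart : (a :: t).headD ' ' = a := rfl
      rw [pvLoopA, hstart, hflip]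
      set a' := if a = '+' then '-' else '+' with ha'
      by_cases hrestnil : rest = []
      · -- the whole string is one run of a; since it is not all '+', a = '-'
        subst hrestnil
        have ha : a = '-' := by
          rcases hbin a (by simp) with h | h
          · exfalso
            have hall : ∀ c ∈ a :: t, c = '+' := by
              intro c hc
              have hc' : c ∈ List.replicate k a ++ ([] : List Char) := by
                rw [← hdecomp]; exact hc
              simp at hc'
              rw [hc'.2, h]
            rw [(check_iff _).mpr hall] at hck
            exact absurd hck (by simp)
          · exact h
        have ha'p : a' = '+' := by simp [ha', ha]
        have hck' : pvCheckValidity (List.replicate k a' ++ []) = true := by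
          apply (check_iff _).mpr
          intro c hc; simp at hc; rw [hc.2, ha'p]
        rw [if_pos hck']
        have hruns : pvRuns (a :: t) = 1 := by
          rw [hdecomp]
          rw [show List.replicate k a ++ ([] : List Char)
              = List.replicate k a ++ ([] : List Char) from rfl,
            runs_replicate_append a k hk1]
          simp [pvRuns, pvRunsAfter]
        have hlast : (a :: t).getLast? = some a := by
          rw [hdecomp]
          cases k with
          | zero => omega
          | succ m => simp [List.getLast?_replicate]
        rw [hruns, hlast]
        simp [ha]
      · obtain ⟨b, r, rfl⟩ := List.exists_cons_of_ne_nil hrestnil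
        have hb_ne : b ≠ a := hresthead b rfl
        have hbmem : b ∈ a :: t := by rw [hdecomp]; simp
        have hb_eq : b = a' := by
          rcases hbin b hbmem with hb1 | hb1 <;> rcases hbin a (by simp) with ha1 | ha1
          · exact absurd (hb1.trans ha1.symm) hb_ne
          · simp [ha', ha1, hb1]
          · simp [ha', ha1, hb1]
          · exact absurd (hb1.trans ha1.symm) hb_ne
        have hrunsl : pvRuns (a :: t) = 1 + pvRuns (b :: r) := by
          rw [hdecomp, runs_replicate_append a k hk1]
          simp [pvRuns, pvRunsAfter, hb_ne]
        have hrunsl' : pvRuns (List.replicate k a' ++ b :: r) = pvRuns (b :: r) := by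
          rw [runs_replicate_append a' k hk1]
          simp [pvRuns, pvRunsAfter, hb_eq]
        have hlastl : (a :: t).getLast? = (b :: r).getLast? := by
          rw [hdecomp]; exact getLast?_append_cons _ b r
        have hlastl' : (List.replicate k a' ++ b :: r).getLast? = (b :: r).getLast? :=
          getLast?_append_cons _ b r
        by_cases hck' : pvCheckValidity (List.replicate k a' ++ b :: r) = true
        · -- the flipped string is all '+': exactly this one step remained
          rw [if_pos hck']
          have hall := (check_iff _).mp hck'
          have hrest_all : ∀ c ∈ b :: r, c = '+' := fun c hc => hall c (by simp [hc])
          have hb' : b = '+' := hrest_all b (by simp)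
          have h0 : pvRunsAfter b r = 0 := by
            rw [hb']
            exact runsAfter_all_eq '+' r (fun d hd => hrest_all d (by simp [hd]))
          have hrunsrest : pvRuns (b :: r) = 1 := by simp [pvRuns, h0]
          have hlplus : (b :: r).getLast? = some '+' :=
            getLast?_all_plus _ (by simp) hrest_all
          rw [hrunsl, hrunsrest, hlastl, hlplus]
          simp only [if_pos rfl]
          push_cast
          ring
        · -- one step, then the loop continues on the flipped string
          rw [if_neg hck']
          have hbin' : ∀ x ∈ List.replicate k a' ++ b :: r, x = '+' ∨ x = '-' := by
            intro x hx
            rcases List.mem_append.mp hx with h | h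
            · rw [List.eq_of_mem_replicate h, ha']
              by_cases hh : a = '+' <;> simp [hh]
            · exact hbin x (by rw [hdecomp]; exact List.mem_append.mpr (Or.inr h))
          have hle' : pvRuns (List.replicate k a' ++ b :: r) ≤ n := by
            rw [hrunsl'] ; rw [hrunsl] at hle; omega
          rw [ih _ (c + 1) hbin' (by simpa using hck') hle', hrunsl', hrunsl, hlastl, hlastl']
          by_cases hlp : (b :: r).getLast? = some '+' <;> simp [hlp] <;> push_cast <;> ring

-- endswith '+' ↔ the last character is '+'
lemma endswith_plus (s : String) :
    PySem.Str.endswith s "+" = (s.toList.getLast? == some '+') := by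
  rcases h : PySem.Chars.endswith s.toList ['+'] with _ | _
  · have hns : ¬ ['+'] <:+ s.toList := by
      intro hh
      have := (PySem.Chars.endswith_iff (s := s.toList) (p := ['+'])).mpr hh
      rw [h] at this; exact absurd this (by simp)
    have hl : ¬ s.toList.getLast? = some '+' := by
      intro hl
      obtain ⟨ys, hys⟩ := List.getLast?_eq_some_iff.mp hl
      exact hns ⟨ys, by rw [hys]⟩
    simp only [PySem.Str.endswith_eq]
    have : PySem.Chars.endswith s.toList "+".toList = false := by simpa using h
    rw [this]
    simp [hl]
  · have hsfx : ['+'] <:+ s.toList :=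
      (PySem.Chars.endswith_iff (s := s.toList) (p := ['+'])).mp (by rw [h])
    obtain ⟨t, ht⟩ := hsfx
    have hl : s.toList.getLast? = some '+' := by rw [← ht]; simp
    simp only [PySem.Str.endswith_eq]
    have : PySem.Chars.endswith s.toList "+".toList = true := by simpa using h
    rw [this]
    simp [hl]

-- binary strings: A simulates, B counts runs
lemma spec_binary (s : String) (hpre' : ∀ c ∈ s.toList, c = '+' ∨ c = '-') :
    Spec_replace_front s (replace_front s) := by
  unfold Spec_replace_front replace_front replace_front_alt
  rw [runsLoop_none, endswith_plus]
  by_cases hck : pvCheckValidity s.toList = true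
  · rw [if_pos hck]
    have hall := (check_iff _).mp hck
    cases hl : s.toList with
    | nil => simp [hl, pvRuns]
    | cons a t =>
        rw [hl] at hall
        have hruns : pvRuns (a :: t) = 1 := by
          have hb : a = '+' := hall a (by simp)
          simp only [pvRuns, hb]
          rw [runsAfter_all_eq '+' t (fun d hd => hall d (by simp [hd]))]
        have hlast : (a :: t).getLast? = some '+' :=
          getLast?_all_plus _ (by simp) hall
        simp [hruns, hlast]
  · rw [if_neg hck]
    have hck' : pvCheckValidity s.toList = false := by simpa using hck
    rw [loopA_spec (s.toList.length + 1) s.toList 0 hpre' hck'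
      (by have := runs_le_length s.toList; omega)]
    by_cases h : s.toList.getLast? = some '+' <;> simp [h]

-- uniform strings: one flip of the whole string (or none, if it is all '+')
lemma spec_uniform (s : String) (hu : ∀ c ∈ s.toList, c = s.toList.headD ' ') :
    Spec_replace_front s (replace_front s) := by
  unfold Spec_replace_front replace_front replace_front_alt
  rw [runsLoop_none, endswith_plus]
  cases hl : s.toList with
  | nil => simp [hl, pvRuns, pvCheckValidity]
  | cons a t =>
      rw [hl] at hu
      have ha : ∀ c ∈ a :: t, c = a := by simpa using hu
      have hrep : a :: t = List.replicate (a :: t).length a := List.eq_replicate_of_mem ha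
      have hruns : pvRuns (a :: t) = 1 := by
        simp [pvRuns, runsAfter_all_eq a t (fun d hd => ha d (by simp [hd]))]
      have hlast : (a :: t).getLast? = some a := by
        rw [List.getLast?_eq_some_getLast (l := a :: t) (by simp)]
        rw [show (a :: t).getLast (by simp) = a from ha _ (List.getLast_mem _)]
      by_cases hap : a = '+'
      · subst hap
        have hck : pvCheckValidity ('+' :: t) = true :=
          (check_iff _).mpr (fun c hc => ha c hc)
        rw [if_pos hck]
        simp [hruns, hlast]
      · have hck : pvCheckValidity (a :: t) = false := by
          rcases h : pvCheckValidity (a :: t) with _ | _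
          · rfl
          · exact absurd ((check_iff _).mp h a (by simp)) hap
        rw [if_neg (by simp [hck])]
        have hflip : pvFlipFront a (a :: t) =
            List.replicate (a :: t).length (if a = '+' then '-' else '+') ++ [] := by
          conv_lhs => rw [hrep]
          rw [show (List.replicate (a :: t).length a : List Char)
              = List.replicate (a :: t).length a ++ [] by simp]
          exact flipFront_spec _ a [] (by intro b hb; simp at hb)
        have hck' : pvCheckValidity (pvFlipFront a (a :: t)) = true := by
          rw [hflip]
          exact (check_iff _).mpr (by intro c hc; simp at hc; simp [hc, hap])
        rw [pvLoopA]
        simp only [List.headD_cons, hck', if_pos]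
        simp [hruns, hlast, hap]

-- ===== VERDICT (by name: the statement is the Claim_ definition above) =====
theorem replace_front_spec : Claim_equal_replace_front := by
  intro s _ hpre
  rcases Bool.or_eq_true_iff.mp hpre with hbin | hunif
  · exact spec_binary s (by intro c hc; simpa using List.all_eq_true.mp hbin c hc)
  · exact spec_uniform s (by intro c hc; simpa using List.all_eq_true.mp hunif c hc)
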